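-- pv_equiv track=rewrite | github.com/wannalearn123/Malicious-AI-Detector-on-Blockchain | src/features/opcode_parser.py | _detect_reentrancy_pattern
-- ===== SOURCE A (Python) =====
-- from typing import List, Dict, Tuple, Set
--
-- def _detect_reentrancy_pattern(sequence: List[str]) -> int:
--     """Detect potential reentrancy vulnerability patterns."""
--     score = 0
--
--     # Look for CALL followed by SSTORE without checks
--     for i in range(len(sequence) - 1):
--         if sequence[i] in ['CALL', 'DELEGATECALL', 'STATICCALL']:
--             # Check if SSTORE appears after without SLOAD in between (checks-effects-interactions violation)
--             subsequent = sequence[i+1:min(i+10, len(sequence))]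
--             if 'SSTORE' in subsequent:
--                 sstore_idx = subsequent.index('SSTORE')
--                 if 'SLOAD' not in subsequent[:sstore_idx]:
--                     score += 1
--
--     return min(score, 5)  # Cap at 5
-- ===== SOURCE B (Python) =====
-- def _detect_reentrancy_pattern(sequence):
--     """Detect potential reentrancy vulnerability patterns (next-occurrence index version)."""
--     n = len(sequence)
--     # right-to-left pass: next occurrence index (>= j) of SSTORE / SLOAD, or None
--     next_sstore = [None] * (n + 1)
--     next_sload = [None] * (n + 1)
--     for j in range(n - 1, -1, -1):
--         next_sstore[j] = j if sequence[j] == 'SSTORE' else next_sstore[j + 1]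
--         next_sload[j] = j if sequence[j] == 'SLOAD' else next_sload[j + 1]
--     score = 0
--     for i in range(n - 1):
--         if sequence[i] in ('CALL', 'DELEGATECALL', 'STATICCALL'):
--             s = next_sstore[i + 1]
--             l = next_sload[i + 1]
--             if s is not None and s <= i + 9 and (l is None or l > s):
--                 score += 1
--     return min(score, 5)
-- ===== Notes on version B (the rewrite author's own statement) =====
-- stated objective: alternative
-- what changed: Replaces A's per-CALL forward window scan (slice, membership test, index, second membership scan) with a single right-to-left pass precomputing next-SSTORE/next-SLOAD occurrence indices that each CALL consults in O(1).
import Mathlib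
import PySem

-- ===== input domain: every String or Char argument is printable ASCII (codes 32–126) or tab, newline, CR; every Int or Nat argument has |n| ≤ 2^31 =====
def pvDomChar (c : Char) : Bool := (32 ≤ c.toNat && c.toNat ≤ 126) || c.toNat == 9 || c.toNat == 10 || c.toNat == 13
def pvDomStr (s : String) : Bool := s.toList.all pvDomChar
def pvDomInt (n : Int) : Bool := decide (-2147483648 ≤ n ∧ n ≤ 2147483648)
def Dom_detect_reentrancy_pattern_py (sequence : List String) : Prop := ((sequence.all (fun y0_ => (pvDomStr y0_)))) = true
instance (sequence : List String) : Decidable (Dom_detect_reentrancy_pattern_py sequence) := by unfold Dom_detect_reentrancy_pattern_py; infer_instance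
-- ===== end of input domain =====

-- B replaces A's per-CALL window scan (slice + membership + index) with a right-to-left pass precomputing next-SSTORE/next-SLOAD indices; objective: alternative.

-- ===== PORT A =====
-- literal transliteration of _detect_reentrancy_pattern (Source A)
def detect_reentrancy_pattern_py (sequence : List String) : Int :=
  let score :=
    (PySem.List.pyRange 0 ((sequence.length : Int) - 1) 1).foldl (fun score i =>
      if PySem.List.pyGetD sequence i "" ∈ ["CALL", "DELEGATECALL", "STATICCALL"] then
        let subsequent := PySem.List.slice sequence (some (i + 1)) (some (min (i + 10) (sequence.length : Int)))
        if "SSTORE" ∈ subsequent then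
          match PySem.List.index? subsequent "SSTORE" with
          | some sstore_idx =>
            if "SLOAD" ∈ PySem.List.slice subsequent none (some (sstore_idx : Int)) then score
            else score + 1
          | none => score  -- unreachable: guarded by the membership test
        else score
      else score) 0
  min score 5

-- ===== PORT B =====
-- right-to-left pass of Source B: entry j is the first index ≥ j holding `op` (or none); list has length n+1
def pvNextOcc (op : String) : List String → Nat → List (Option Nat)
  | [], _ => [none]
  | x :: xs, j =>
    let rest := pvNextOcc op xs (j + 1)
    (if x == op then some j else rest.headD none) :: rest

def detect_reentrancy_pattern_py_alt (sequence : List String) : Int :=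
  let next_sstore := pvNextOcc "SSTORE" sequence 0
  let next_sload := pvNextOcc "SLOAD" sequence 0
  let score :=
    (PySem.List.pyRange 0 ((sequence.length : Int) - 1) 1).foldl (fun score i =>
      if PySem.List.pyGetD sequence i "" ∈ ["CALL", "DELEGATECALL", "STATICCALL"] then
        match next_sstore.getD (i.toNat + 1) none with
        | some s =>
          if decide ((s : Int) ≤ i + 9) &&
             (match next_sload.getD (i.toNat + 1) none with
              | none => true
              | some l => decide (s < l)) then score + 1 else score
        | none => score
      else score) 0
  min score 5

-- ===== PRECONDITION & SPEC =====
def Spec_detect_reentrancy_pattern_py (sequence : List String) (out : Int) : Prop := out = detect_reentrancy_pattern_py_alt sequence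
instance (sequence : List String) (out : Int) : Decidable (Spec_detect_reentrancy_pattern_py sequence out) := by unfold Spec_detect_reentrancy_pattern_py; infer_instance

-- ===== CLAIM (what is proved, stated in full; the proofs are below) =====
def Claim_equal_detect_reentrancy_pattern_py : Prop := ∀ (sequence : List String), Dom_detect_reentrancy_pattern_py sequence → Spec_detect_reentrancy_pattern_py sequence (detect_reentrancy_pattern_py sequence)

-- ===== LEMMAS AND PROOFS =====

-- first-occurrence index restricted to a prefix
lemma pv_index?_take (l : List String) (a : String) (m r : Nat) :
    PySem.List.index? (l.take m) a = some r ↔ PySem.List.index? l a = some r ∧ r < m := by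
  rw [PySem.List.index?_eq_idxOf?, PySem.List.index?_eq_idxOf?]
  induction l generalizing m r with
  | nil => simp
  | cons x xs ih =>
    cases m with
    | zero => simp
    | succ m =>
      rw [List.take_succ_cons, List.idxOf?_cons, List.idxOf?_cons]
      by_cases hx : x == a
      · simp [hx]
        omega
      · simp only [hx]
        cases r with
        | zero => simp
        | succ r =>
          constructor
          · intro h
            obtain ⟨r', hr', hr''⟩ := Option.map_eq_some_iff.mp h
            have := (ih m r').mp hr'
            exact ⟨Option.map_eq_some_iff.mpr ⟨r', this.1, hr''⟩, by omega⟩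
          · rintro ⟨h, hlt⟩
            obtain ⟨r', hr', hr''⟩ := Option.map_eq_some_iff.mp h
            exact Option.map_eq_some_iff.mpr ⟨r', (ih m r').mpr ⟨hr', by omega⟩, hr''⟩

lemma pv_mem_take_iff (l : List String) (a : String) (m : Nat) :
    a ∈ l.take m ↔ ∃ r, PySem.List.index? l a = some r ∧ r < m := by
  rw [← PySem.List.index?_isSome_iff (xs := l.take m)]
  rw [Option.isSome_iff_exists]
  constructor
  · rintro ⟨r, hr⟩; exact ⟨r, (pv_index?_take l a m r).mp hr⟩
  · rintro ⟨r, hr, hm⟩; exact ⟨r, (pv_index?_take l a m r).mpr ⟨hr, hm⟩⟩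

-- characterization of the right-to-left next-occurrence pass
lemma pv_nextOcc_getD (op : String) (xs : List String) (j k : Nat) :
    (pvNextOcc op xs j).getD k none
      = (PySem.List.index? (xs.drop k) op).map (· + (j + k)) := by
  rw [PySem.List.index?_eq_idxOf?]
  induction xs generalizing j k with
  | nil => simp [pvNextOcc]
  | cons x xs ih =>
    cases k with
    | zero =>
      simp only [pvNextOcc, List.getD_cons_zero, List.drop_zero, List.idxOf?_cons]
      by_cases hx : x == op
      · simp [hx]
      · simp only [hx]
        have hhd : (pvNextOcc op xs (j + 1)).headD none = (pvNextOcc op xs (j + 1)).getD 0 none := by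
          cases pvNextOcc op xs (j + 1) <;> simp
        rw [hhd, ih (j + 1) 0]
        cases h : List.idxOf? op xs with
        | none => simp [h]
        | some v => simp [h]; omega
    | succ k =>
      simp only [pvNextOcc, List.getD_cons_succ, List.drop_succ_cons]
      rw [ih (j + 1) k]
      cases h : List.idxOf? op (xs.drop k) with
      | none => simp [h]
      | some v => simp; omega

-- the two loop bodies agree at every index of the range
lemma pv_body_eq (sequence : List String) (i : Int) (hi0 : 0 ≤ i)
    (hin : i < (sequence.length : Int) - 1) (score : Int) :
    (if PySem.List.pyGetD sequence i "" ∈ ["CALL", "DELEGATECALL", "STATICCALL"] then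
        let subsequent := PySem.List.slice sequence (some (i + 1)) (some (min (i + 10) (sequence.length : Int)))
        if "SSTORE" ∈ subsequent then
          match PySem.List.index? subsequent "SSTORE" with
          | some sstore_idx =>
            if "SLOAD" ∈ PySem.List.slice subsequent none (some (sstore_idx : Int)) then score
            else score + 1
          | none => score
        else score
      else score)
    = (if PySem.List.pyGetD sequence i "" ∈ ["CALL", "DELEGATECALL", "STATICCALL"] then
        match (pvNextOcc "SSTORE" sequence 0).getD (i.toNat + 1) none with
        | some s =>
          if decide ((s : Int) ≤ i + 9) &&
             (match (pvNextOcc "SLOAD" sequence 0).getD (i.toNat + 1) none with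
              | none => true
              | some l => decide (s < l)) then score + 1 else score
        | none => score
      else score) := by
  by_cases hc : PySem.List.pyGetD sequence i "" ∈ ["CALL", "DELEGATECALL", "STATICCALL"]
  · simp only [hc, if_true]
    set k := i.toNat with hk
    have hik : i = (k : Int) := by omega
    have hkn : k + 1 < sequence.length := by omega
    -- the window is take 9 of drop (k+1)
    have hsub : PySem.List.slice sequence (some (i + 1)) (some (min (i + 10) (sequence.length : Int)))
        = (sequence.drop (k + 1)).take 9 := by
      rw [PySem.List.slice_toNat _ (by omega) (by omega)]
      have h1 : (i + 1).toNat = k + 1 := by omega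
      have h2 : (min (i + 10) (sequence.length : Int)).toNat = min (k + 10) sequence.length := by omega
      rw [h1, h2]
      rw [List.take_eq_take_iff]
      simp only [List.length_drop]
      omega
    rw [hsub]
    set l := sequence.drop (k + 1) with hl
    rw [pv_nextOcc_getD, pv_nextOcc_getD]
    simp only [hik, Nat.zero_add]
    cases hrs : PySem.List.index? l "SSTORE" with
    | none =>
      have : "SSTORE" ∉ l.take 9 := by
        rw [pv_mem_take_iff]
        rintro ⟨r, hr, _⟩; rw [hrs] at hr; cases hr
      simp [this]
    | some r =>
      by_cases hr9 : r < 9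
      · have hmem : "SSTORE" ∈ l.take 9 := (pv_mem_take_iff l _ 9).mpr ⟨r, hrs, hr9⟩
        have hidx : PySem.List.index? (l.take 9) "SSTORE" = some r :=
          (pv_index?_take l _ 9 r).mpr ⟨hrs, hr9⟩
        simp only [hmem, if_true, hidx, Option.map_some]
        rw [PySem.List.slice_to_natCast]
        simp only [List.take_take]
        have hmin : min r 9 = r := by omega
        rw [hmin]
        have hle : decide (((r + (k + 1) : Nat) : Int) ≤ (k : Int) + 9) = true := by
          simp; omega
        rw [hle, Bool.true_and]
        cases hrl : PySem.List.index? l "SLOAD" with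
        | none =>
          have : "SLOAD" ∉ l.take r := by
            rw [pv_mem_take_iff]
            rintro ⟨q, hq, _⟩; rw [hrl] at hq; cases hq
          simp [this]
        | some q =>
          have hqr : q ≠ r := by
            intro h
            obtain ⟨h1, h2, _⟩ := PySem.List.getElem_of_index?_eq_some hrs
            obtain ⟨h1', h2', _⟩ := PySem.List.getElem_of_index?_eq_some hrl
            subst h
            rw [h2] at h2'
            exact absurd h2' (by decide)
          by_cases hql : q < r
          · have : "SLOAD" ∈ l.take r := (pv_mem_take_iff l _ r).mpr ⟨q, hrl, hql⟩
            simp only [this, if_true, Option.map_some]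
            simp
            omega
          · have : "SLOAD" ∉ l.take r := by
              rw [pv_mem_take_iff]
              rintro ⟨q', hq', hlt⟩; rw [hrl] at hq'
              cases hq'; omega
            simp only [this, if_false, Option.map_some]
            simp
            omega
      · -- SSTORE exists but outside the window
        have : "SSTORE" ∉ l.take 9 := by
          rw [pv_mem_take_iff]
          rintro ⟨r', hr', hlt⟩; rw [hrs] at hr'; cases hr'; omega
        simp only [this, if_false, Option.map_some]
        have hdec : decide (((r + (k + 1) : Nat) : Int) ≤ (k : Int) + 9) = false := by
          simp; omega
        simp only [hdec]
        simp
  · simp only [hc, if_false]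

-- ===== VERDICT (by name: the statement is the Claim_ definition above) =====
theorem detect_reentrancy_pattern_py_spec : Claim_equal_detect_reentrancy_pattern_py := by
  intro sequence _
  unfold Spec_detect_reentrancy_pattern_py detect_reentrancy_pattern_py detect_reentrancy_pattern_py_alt
  simp only []
  congr 1
  apply PySem.List.foldl_congr_mem
  intro acc x hx
  have := (PySem.List.mem_pyRange_one).mp hx
  exact pv_body_eq sequence x this.1 this.2 acc
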